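-- pv_equiv track=rewrite | github.com/Mejri10/codewars-solutions | 6-kyu/odd-heavy-array/python/solution.py | isOddHeavy
-- ===== SOURCE A (Python) =====
-- def isOddHeavy(arr):
--     """
--     Time complexity: O(N) whereby N is length arr.
--     """
--     greatestEvenNumber = float("-inf")
--     lowestOddNumber = float("inf")
--     for n in arr:
--         if n % 2 == 0:
--             if n > greatestEvenNumber:
--                 greatestEvenNumber = n
--         else:
--             if n < lowestOddNumber:
--                 lowestOddNumber = n
--         if lowestOddNumber < greatestEvenNumber:
--             return False
--     return lowestOddNumber != float('inf')
-- ===== SOURCE B (Python) =====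
-- def isOddHeavy(arr):
--     odds = [n for n in arr if n % 2 != 0]
--     evens = [n for n in arr if n % 2 == 0]
--     if not odds:
--         return False
--     if not evens:
--         return True
--     return min(odds) > max(evens)
-- ===== Notes on version B (the rewrite author's own statement) =====
-- stated objective: simpler
-- what changed: Replaces A's single fused pass with running extrema sentinels and a mid-loop early exit by a partition into odds/evens comprehensions followed by aggregate min/max and one strict comparison.
import Mathlib
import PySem

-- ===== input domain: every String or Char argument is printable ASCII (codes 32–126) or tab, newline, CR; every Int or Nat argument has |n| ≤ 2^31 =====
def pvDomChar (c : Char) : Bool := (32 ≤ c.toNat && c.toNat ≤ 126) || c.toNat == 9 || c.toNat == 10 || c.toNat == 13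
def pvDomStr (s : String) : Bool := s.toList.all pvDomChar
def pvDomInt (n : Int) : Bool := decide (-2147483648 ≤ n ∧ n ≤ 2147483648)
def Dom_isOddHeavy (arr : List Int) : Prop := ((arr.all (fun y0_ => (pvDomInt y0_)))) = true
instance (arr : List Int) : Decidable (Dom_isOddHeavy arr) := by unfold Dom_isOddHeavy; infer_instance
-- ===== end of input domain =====

-- B partitions into odds/evens and compares min(odds) > max(evens); A is a fused single pass with
-- running extrema and an early exit. Objective: simpler (not faster).

-- ===== PORT A =====
-- literal transliteration of A's loop; the float sentinels -inf/+inf become Option Int (none = unset)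
def isOddHeavyLoop : List Int → Option Int → Option Int → Bool
  | [], _, lo => lo.isSome
  | n :: rest, ge, lo =>
    let ge' := if n % 2 == 0 then
        (match ge with | none => some n | some g => if n > g then some n else some g)
      else ge
    let lo' := if n % 2 == 0 then lo
      else (match lo with | none => some n | some l => if n < l then some n else some l)
    if (match lo', ge' with | some l, some g => decide (l < g) | _, _ => false) then false
    else isOddHeavyLoop rest ge' lo'

def isOddHeavy (arr : List Int) : Bool := isOddHeavyLoop arr none none

-- ===== PORT B =====
def isOddHeavy_alt (arr : List Int) : Bool :=
  let odds := arr.filter (fun n => !(n % 2 == 0))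
  let evens := arr.filter (fun n => n % 2 == 0)
  if odds.isEmpty then false
  else if evens.isEmpty then true
  else match PySem.List.min? odds (fun x => x), PySem.List.max? evens (fun x => x) with
    | some lo, some hi => decide (hi < lo)
    | _, _ => false

-- ===== PRECONDITION & SPEC =====
def Spec_isOddHeavy (arr : List Int) (out : Bool) : Prop := out = isOddHeavy_alt arr
instance (arr : List Int) (out : Bool) : Decidable (Spec_isOddHeavy arr out) := by unfold Spec_isOddHeavy; infer_instance

-- ===== CLAIM (what is proved, stated in full; the proofs are below) =====
def Claim_equal_isOddHeavy : Prop := ∀ (arr : List Int), Dom_isOddHeavy arr → Spec_isOddHeavy arr (isOddHeavy arr)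

-- ===== LEMMAS AND PROOFS =====

def oMax (o : Option Int) (n : Int) : Option Int := some (o.elim n (max · n))
def oMin (o : Option Int) (n : Int) : Option Int := some (o.elim n (min · n))
def runGe (ge : Option Int) (l : List Int) : Option Int :=
  l.foldl (fun o n => if n % 2 == 0 then oMax o n else o) ge
def runLo (lo : Option Int) (l : List Int) : Option Int :=
  l.foldl (fun o n => if n % 2 == 0 then o else oMin o n) lo
def bad : Option Int → Option Int → Bool
  | some l, some g => decide (l < g)
  | _, _ => false

lemma geUpd_eq (ge : Option Int) (n : Int) :
    (match ge with | none => some n | some g => if n > g then some n else some g) = oMax ge n := by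
  cases ge with
  | none => rfl
  | some g =>
    by_cases h : n > g <;> simp only [oMax, Option.elim, h, ite_true, ite_false] <;>
      congr 1 <;> omega

lemma loUpd_eq (lo : Option Int) (n : Int) :
    (match lo with | none => some n | some l => if n < l then some n else some l) = oMin lo n := by
  cases lo with
  | none => rfl
  | some l =>
    by_cases h : n < l <;> simp only [oMin, Option.elim, h, ite_true, ite_false] <;>
      congr 1 <;> omega

lemma bad_eq (a b : Option Int) :
    (match a, b with | some l, some g => decide (l < g) | _, _ => false) = bad a b := by
  cases a <;> cases b <;> rfl

lemma runLo_some_le : ∀ (l : List Int) (x : Int), ∃ y, runLo (some x) l = some y ∧ y ≤ x := by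
  intro l
  induction l with
  | nil => intro x; exact ⟨x, rfl, le_refl x⟩
  | cons n t ih =>
    intro x
    by_cases h : (n % 2 == 0) = true
    · have hstep : runLo (some x) (n :: t) = runLo (some x) t := by
        simp only [runLo, List.foldl, if_pos h]
      rw [hstep]; exact ih x
    · have hstep : runLo (some x) (n :: t) = runLo (some (min x n)) t := by
        simp only [runLo, List.foldl, if_neg h, oMin, Option.elim]
      rw [hstep]
      obtain ⟨y, hy, hle⟩ := ih (min x n)
      exact ⟨y, hy, le_trans hle (min_le_left x n)⟩

lemma runGe_some_ge : ∀ (l : List Int) (x : Int), ∃ y, runGe (some x) l = some y ∧ x ≤ y := by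
  intro l
  induction l with
  | nil => intro x; exact ⟨x, rfl, le_refl x⟩
  | cons n t ih =>
    intro x
    by_cases h : (n % 2 == 0) = true
    · have hstep : runGe (some x) (n :: t) = runGe (some (max x n)) t := by
        simp only [runGe, List.foldl, if_pos h, oMax, Option.elim]
      rw [hstep]
      obtain ⟨y, hy, hle⟩ := ih (max x n)
      exact ⟨y, hy, le_trans (le_max_left x n) hle⟩
    · have hstep : runGe (some x) (n :: t) = runGe (some x) t := by
        simp only [runGe, List.foldl, if_neg h]
      rw [hstep]; exact ih x

lemma loop_char : ∀ (l : List Int) (ge lo : Option Int), bad lo ge = false →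
    isOddHeavyLoop l ge lo = ((runLo lo l).isSome && !bad (runLo lo l) (runGe ge l)) := by
  intro l
  induction l with
  | nil =>
    intro ge lo h
    simp only [isOddHeavyLoop, runLo, runGe, List.foldl, h, Bool.not_false, Bool.and_true]
  | cons n t ih =>
    intro ge lo h
    have hstep : isOddHeavyLoop (n :: t) ge lo =
        (if bad (if (n % 2 == 0) = true then lo else oMin lo n)
              (if (n % 2 == 0) = true then oMax ge n else ge) = true then false
         else isOddHeavyLoop t (if (n % 2 == 0) = true then oMax ge n else ge)
              (if (n % 2 == 0) = true then lo else oMin lo n)) := by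
      simp only [isOddHeavyLoop, geUpd_eq, loUpd_eq, bad_eq]
    have hLo : runLo lo (n :: t) =
        runLo (if (n % 2 == 0) = true then lo else oMin lo n) t := rfl
    have hGe : runGe ge (n :: t) =
        runGe (if (n % 2 == 0) = true then oMax ge n else ge) t := rfl
    rw [hstep, hLo, hGe]
    generalize (if (n % 2 == 0) = true then oMax ge n else ge) = ge'
    generalize (if (n % 2 == 0) = true then lo else oMin lo n) = lo'
    by_cases hb : bad lo' ge' = true
    · rw [if_pos hb]
      obtain ⟨a, b, hla, hgb, hab⟩ :
          ∃ a b, lo' = some a ∧ ge' = some b ∧ a < b := by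
        cases lo' with
        | none => simp [bad] at hb
        | some a =>
          cases ge' with
          | none => simp [bad] at hb
          | some b => exact ⟨a, b, rfl, rfl, by simpa [bad] using hb⟩
      obtain ⟨a', ha', ha'le⟩ := runLo_some_le t a
      obtain ⟨b', hb', hb'ge⟩ := runGe_some_ge t b
      rw [hla, hgb, ha', hb']
      have : a' < b' := by omega
      simp [bad, this]
    · rw [if_neg hb]
      exact ih ge' lo' (by simpa using hb)

lemma runLo_filter : ∀ (l : List Int) (lo : Option Int),
    runLo lo l = (l.filter (fun n => !(n % 2 == 0))).foldl oMin lo := by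
  intro l
  induction l with
  | nil => intro lo; rfl
  | cons n t ih =>
    intro lo
    by_cases h : (n % 2 == 0) = true
    · have h2 : (!(n % 2 == 0)) = false := by simp [h]
      have hstep : runLo lo (n :: t) = runLo lo t := by
        simp only [runLo, List.foldl, if_pos h]
      rw [hstep, ih, List.filter_cons, h2]
      simp only [Bool.false_eq_true, if_false]
    · have h2 : (!(n % 2 == 0)) = true := by simp [h]
      have hstep : runLo lo (n :: t) = runLo (oMin lo n) t := by
        simp only [runLo, List.foldl, if_neg h]
      rw [hstep, ih, List.filter_cons, h2]
      simp only [if_true, List.foldl]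

lemma runGe_filter : ∀ (l : List Int) (ge : Option Int),
    runGe ge l = (l.filter (fun n => n % 2 == 0)).foldl oMax ge := by
  intro l
  induction l with
  | nil => intro ge; rfl
  | cons n t ih =>
    intro ge
    by_cases h : (n % 2 == 0) = true
    · have hstep : runGe ge (n :: t) = runGe (oMax ge n) t := by
        simp only [runGe, List.foldl, if_pos h]
      rw [hstep, ih, List.filter_cons, h]
      simp only [if_true, List.foldl]
    · have hstep : runGe ge (n :: t) = runGe ge t := by
        simp only [runGe, List.foldl, if_neg h]
      rw [hstep, ih, List.filter_cons, if_neg (by simp [h])]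

lemma foldl_oMin_some : ∀ (t : List Int) (x : Int), t.foldl oMin (some x) = some (t.foldl min x) := by
  intro t
  induction t with
  | nil => intro x; rfl
  | cons n t ih => intro x; simp only [List.foldl, oMin, Option.elim, ih]

lemma foldl_oMax_some : ∀ (t : List Int) (x : Int), t.foldl oMax (some x) = some (t.foldl max x) := by
  intro t
  induction t with
  | nil => intro x; rfl
  | cons n t ih => intro x; simp only [List.foldl, oMax, Option.elim, ih]

-- ===== VERDICT (by name: the statement is the Claim_ definition above) =====
theorem isOddHeavy_spec : Claim_equal_isOddHeavy := by
  intro arr _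
  unfold Spec_isOddHeavy isOddHeavy isOddHeavy_alt
  have h := loop_char arr none none rfl
  rw [h, runLo_filter, runGe_filter]
  cases hodds : arr.filter (fun n => !(n % 2 == 0)) with
  | nil => simp [bad]
  | cons oh ot =>
    cases hevens : arr.filter (fun n => n % 2 == 0) with
    | nil =>
      simp only [List.foldl]
      rw [show oMin none oh = some oh from rfl, foldl_oMin_some]
      simp [bad]
    | cons eh et =>
      simp only [List.foldl]
      rw [show oMin none oh = some oh from rfl, foldl_oMin_some,
          show oMax none eh = some eh from rfl, foldl_oMax_some]
      have hmin : PySem.List.min? (oh :: ot) (fun x => x) = some (ot.foldl min oh) :=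
        PySem.List.min?_id_cons oh ot
      have hmax : PySem.List.max? (eh :: et) (fun x => x) = some (et.foldl max eh) :=
        PySem.List.max?_id_cons eh et
      simp only [List.isEmpty, hmin, hmax, bad]
      -- the minimum odd and maximum even have different parity, hence are distinct
      have hm : ot.foldl min oh ∈ oh :: ot :=
        PySem.List.min?_mem (key := fun x => x) hmin
      have hM : et.foldl max eh ∈ eh :: et :=
        PySem.List.max?_mem (key := fun x => x) hmax
      have hmo : ¬ (ot.foldl min oh) % 2 = 0 := by
        have := List.of_mem_filter (hodds ▸ hm)
        simpa using this
      have hMe : (et.foldl max eh) % 2 = 0 := by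
        have := List.of_mem_filter (hevens ▸ hM)
        simpa using this
      have hne : ot.foldl min oh ≠ et.foldl max eh := fun he => hmo (he ▸ hMe)
      by_cases hlt : ot.foldl min oh < et.foldl max eh <;> simp [hlt] <;> omega
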